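-- pv_equiv track=rewrite | github.com/lumorphnetwork/code | collective_algorithms.py | is_all_to_all
-- ===== SOURCE A (Python) =====
-- def is_all_to_all(links):
--     neighbors = {}
--     for link in links:
--         u, v = link
--         if u not in neighbors:
--             neighbors[u] = set()
--         neighbors[u].add(v)
--
--     for u in neighbors:
--         if len(neighbors[u]) != len(neighbors) - 1:
--             return False
--
--     return True
-- ===== SOURCE B (Python) =====
-- def is_all_to_all(links):
--     edges = list(dict.fromkeys(map(tuple, links)))
--     sizes = []
--     while edges:
--         u = edges[0][0]
--         sizes.append(len([e for e in edges if e[0] == u]))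
--         edges = [e for e in edges if e[0] != u]
--     n = len(sizes)
--     return all(s == n - 1 for s in sizes)
-- ===== Notes on version B (the rewrite author's own statement) =====
-- stated objective: alternative
-- what changed: Replaces A's hash-grouping (a dict mapping each source to its own target set, then a per-key size check) by a worklist algorithm: dedup the edge list once, then repeatedly strip the first remaining source's whole run out of the worklist by filtering, recording each run's size; finally compare every run size to n-1.
import Mathlib
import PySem

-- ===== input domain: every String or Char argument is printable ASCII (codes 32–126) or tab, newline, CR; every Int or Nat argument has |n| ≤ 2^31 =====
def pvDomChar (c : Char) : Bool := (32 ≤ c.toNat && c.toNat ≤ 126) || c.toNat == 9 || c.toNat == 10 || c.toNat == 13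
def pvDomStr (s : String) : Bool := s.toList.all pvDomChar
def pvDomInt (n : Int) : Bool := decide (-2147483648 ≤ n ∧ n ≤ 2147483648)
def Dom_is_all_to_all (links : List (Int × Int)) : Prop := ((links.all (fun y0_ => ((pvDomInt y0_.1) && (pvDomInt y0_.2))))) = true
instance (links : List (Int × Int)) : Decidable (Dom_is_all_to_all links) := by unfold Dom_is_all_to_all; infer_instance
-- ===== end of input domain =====

-- B replaces A's dict of per-source target sets by a worklist algorithm: dedup
-- the edges once, then repeatedly strip the first source's run out by filtering,
-- recording run sizes (objective: alternative decomposition).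

-- ===== PORT A =====
def is_all_to_all (links : List (Int × Int)) : Bool :=
  let neighbors : PySem.Dict Int (PySem.Set Int) :=
    links.foldl (fun d link =>
      let d1 := if d.contains link.1 then d else d.insert link.1 PySem.Set.empty
      d1.insert link.1 (PySem.Set.add (d1.getD link.1 PySem.Set.empty) link.2))
      PySem.Dict.empty
  neighbors.keys.all (fun u =>
    ((neighbors.getD u PySem.Set.empty).length : Int) == (neighbors.size : Int) - 1)

-- ===== PORT B =====
-- the while loop of Source B: strip the first source's run from the worklist, record its size
def pvSizes : List (Int × Int) → List Int
  | [] => []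
  | e :: t =>
    let u := e.1
    let mine := (e :: t).filter (fun p => p.1 == u)
    (mine.length : Int) :: pvSizes ((e :: t).filter (fun p => !(p.1 == u)))
termination_by es => es.length
decreasing_by
  simp only [List.filter_cons, beq_self_eq_true, Bool.not_true, Bool.false_eq_true,
    if_false, List.length_cons]
  exact Nat.lt_succ_of_le (List.length_filter_le _ _)

def is_all_to_all_alt (links : List (Int × Int)) : Bool :=
  let edges := PySem.List.dedup links
  let sizes := pvSizes edges
  let n : Int := sizes.length
  sizes.all (fun s => s == n - 1)

-- ===== PRECONDITION & SPEC =====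
def Spec_is_all_to_all (links : List (Int × Int)) (out : Bool) : Prop := out = is_all_to_all_alt links
instance (links : List (Int × Int)) (out : Bool) : Decidable (Spec_is_all_to_all links out) := by unfold Spec_is_all_to_all; infer_instance

-- ===== CLAIM (what is proved, stated in full; the proofs are below) =====
def Claim_equal_is_all_to_all : Prop := ∀ (links : List (Int × Int)), Dom_is_all_to_all links → Spec_is_all_to_all links (is_all_to_all links)

-- ===== LEMMAS AND PROOFS =====

theorem update_nil {α : Type} [BEq α] (m : List α) :
    PySem.Set.update PySem.Set.empty m = PySem.Set.ofList m := by
  simp [PySem.Set.update, PySem.Set.ofList_eq_foldl, PySem.Set.empty]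

theorem update_nil' {α : Type} [BEq α] (m : List α) :
    PySem.Set.update ([] : List α) m = PySem.Set.ofList m := by
  simp [PySem.Set.update, PySem.Set.ofList_eq_foldl]

-- A's loop body (ensure the key exists, then re-store the enlarged target set) is one read-add-store.
theorem stepA (d : PySem.Dict Int (PySem.Set Int)) (p : Int × Int) :
    (let d1 := if d.contains p.1 then d else d.insert p.1 PySem.Set.empty
     d1.insert p.1 (PySem.Set.add (d1.getD p.1 PySem.Set.empty) p.2))
    = d.insert p.1 (PySem.Set.add (d.getD p.1 PySem.Set.empty) p.2) := by
  by_cases h : d.contains p.1 = true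
  · simp [h]
  · have h' : d.contains p.1 = false := by simpa using h
    have hg : d.getD p.1 ([] : PySem.Set Int) = ([] : PySem.Set Int) := by
      simp [PySem.Dict.getD_of_not_contains, h']
    simp [h', PySem.Dict.getD_insert_self, PySem.Dict.insert_insert_self,
      PySem.Set.add, PySem.Set.contains, PySem.Set.empty, hg]

-- A's dict after the loop: the value at u collects the seconds of links whose first is u.
theorem foldA_getD (links : List (Int × Int)) :
    ∀ (d : PySem.Dict Int (PySem.Set Int)) (u : Int),
    (links.foldl (fun d p => d.insert p.1 (PySem.Set.add (d.getD p.1 PySem.Set.empty) p.2)) d).getD u PySem.Set.empty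
      = PySem.Set.update (d.getD u PySem.Set.empty) ((links.filter (fun p => p.1 == u)).map (·.2)) := by
  induction links with
  | nil => intro d u; simp [PySem.Set.update]
  | cons p t ih =>
    intro d u
    simp only [List.foldl_cons, List.filter_cons]
    rw [ih]
    by_cases h : p.1 = u
    · subst h
      have hb : (p.1 == p.1) = true := by simp
      simp only [hb, if_pos, List.map_cons]
      rw [PySem.Dict.getD_insert]
      simp [PySem.Set.update]
    · have hb : (p.1 == u) = false := by simp [h]
      have hne : ¬ (u = p.1) := fun hh => h hh.symm
      simp only [hb, Bool.false_eq_true]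
      rw [PySem.Dict.getD_insert]
      simp [hne]

-- Set.add commutes with filter.
theorem filter_add (s : List (Int × Int)) (x : Int × Int) (p : Int × Int → Bool) :
    (PySem.Set.add s x).filter p = if p x then PySem.Set.add (s.filter p) x else s.filter p := by
  by_cases hx : x ∈ s
  · by_cases hp : p x = true
    · have hxf : x ∈ s.filter p := List.mem_filter.mpr ⟨hx, hp⟩
      simp [PySem.Set.add, PySem.Set.contains, hx, hp, hxf]
    · simp [PySem.Set.add, PySem.Set.contains, hx, hp]
  · by_cases hp : p x = true
    · have hxf : x ∉ s.filter p := fun hh => hx (List.mem_filter.mp hh).1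
      simp [PySem.Set.add, PySem.Set.contains, hx, hp, hxf, List.filter_append]
    · have hp' : p x = false := by simpa using hp
      simp [PySem.Set.add, PySem.Set.contains, hx, hp', List.filter_append]

-- dedup-by-first-occurrence commutes with filter (accumulator form).
theorem update_filter (p : Int × Int → Bool) (l : List (Int × Int)) :
    ∀ s : List (Int × Int),
    (PySem.Set.update s l).filter p = PySem.Set.update (s.filter p) (l.filter p) := by
  induction l with
  | nil => intro s; simp [PySem.Set.update]
  | cons x t ih =>
    intro s
    simp only [List.filter_cons]
    by_cases hp : p x = true
    · simp only [hp, if_pos]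
      have h1 : PySem.Set.update s (x :: t) = PySem.Set.update (PySem.Set.add s x) t := by
        simp [PySem.Set.update]
      have h2 : PySem.Set.update (s.filter p) (x :: t.filter p)
          = PySem.Set.update (PySem.Set.add (s.filter p) x) (t.filter p) := by
        simp [PySem.Set.update]
      rw [h1, h2, ih, filter_add, if_pos hp]
    · have hp' : p x = false := by simpa using hp
      simp only [hp', Bool.false_eq_true]
      have h1 : PySem.Set.update s (x :: t) = PySem.Set.update (PySem.Set.add s x) t := by
        simp [PySem.Set.update]
      rw [h1, ih, filter_add, hp']
      simp

theorem ofList_filter (l : List (Int × Int)) (p : Int × Int → Bool) :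
    PySem.Set.ofList (l.filter p) = (PySem.Set.ofList l).filter p := by
  rw [← update_nil' (l.filter p), ← update_nil' l, update_filter]
  simp

theorem mem_add_cases (s : List (Int × Int)) (x a : Int × Int)
    (ha : a ∈ PySem.Set.add s x) : a ∈ s ∨ a = x := by
  by_cases hxx : x ∈ s
  · left; simpa [PySem.Set.add, PySem.Set.contains, hxx] using ha
  · simpa [PySem.Set.add, PySem.Set.contains, hxx] using ha

-- Set.add commutes with a map that reflects membership at x.
theorem setMap_add (s : List (Int × Int)) (x : Int × Int) (f : Int × Int → Int)
    (hmem : f x ∈ s.map f ↔ x ∈ s) :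
    (PySem.Set.add s x).map f = PySem.Set.add (s.map f) (f x) := by
  by_cases hx : x ∈ s
  · simp [PySem.Set.add, PySem.Set.contains, hx, hmem.mpr hx]
  · have hnot : f x ∉ s.map f := fun hh => hx (hmem.mp hh)
    simp [PySem.Set.add, PySem.Set.contains, hx, hnot]

-- dedup commutes with a map injective on the involved elements (accumulator form).
theorem update_map_inj (f : Int × Int → Int) (l : List (Int × Int)) :
    ∀ s : List (Int × Int),
    (∀ a, (a ∈ s ∨ a ∈ l) → ∀ b, (b ∈ s ∨ b ∈ l) → f a = f b → a = b) →
    PySem.Set.update (s.map f) (l.map f) = (PySem.Set.update s l).map f := by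
  induction l with
  | nil => intro s _; simp [PySem.Set.update]
  | cons x t ih =>
    intro s hinj
    have hmem : f x ∈ s.map f ↔ x ∈ s := by
      constructor
      · intro h
        obtain ⟨a, ha, hfa⟩ := List.mem_map.mp h
        have : a = x := hinj a (Or.inl ha) x (Or.inr (by simp)) hfa
        rwa [this] at ha
      · intro h; exact List.mem_map_of_mem h
    have h1 : PySem.Set.update (s.map f) ((x :: t).map f)
        = PySem.Set.update (PySem.Set.add (s.map f) (f x)) (t.map f) := by
      simp [PySem.Set.update]
    have h2 : PySem.Set.update s (x :: t) = PySem.Set.update (PySem.Set.add s x) t := by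
      simp [PySem.Set.update]
    rw [h1, h2, ← setMap_add s x f hmem, ih]
    intro a ha b hb hfab
    refine hinj a ?_ b ?_ hfab
    · rcases ha with ha | ha
      · rcases mem_add_cases s x a ha with h | h
        · exact Or.inl h
        · exact Or.inr (by simp [h])
      · exact Or.inr (by simp [ha])
    · rcases hb with hb | hb
      · rcases mem_add_cases s x b hb with h | h
        · exact Or.inl h
        · exact Or.inr (by simp [h])
      · exact Or.inr (by simp [hb])

theorem ofList_map_inj (l : List (Int × Int)) (f : Int × Int → Int)
    (hf : ∀ a ∈ l, ∀ b ∈ l, f a = f b → a = b) :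
    PySem.Set.ofList (l.map f) = (PySem.Set.ofList l).map f := by
  rw [← update_nil' (l.map f), ← update_nil' l]
  have h0 : (([] : List (Int × Int)).map f) = ([] : List Int) := rfl
  rw [← h0, update_map_inj f l]
  intro a ha b hb
  rcases ha with ha | ha
  · exact absurd ha (List.not_mem_nil)
  · rcases hb with hb | hb
    · exact fun _ => absurd hb (List.not_mem_nil)
    · exact hf a ha b hb

-- core count fact: #distinct targets of u among links = multiplicity of u among the deduped edges' sources.
theorem count_core (links : List (Int × Int)) (u : Int) :
    (PySem.Set.ofList ((links.filter (fun p => p.1 == u)).map (·.2))).length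
      = ((PySem.Set.ofList links).map (·.1)).count u := by
  have hinj : ∀ a ∈ links.filter (fun p => p.1 == u), ∀ b ∈ links.filter (fun p => p.1 == u),
      a.2 = b.2 → a = b := by
    intro a ha b hb hab
    have ha1 : a.1 = u := by simpa using (List.mem_filter.mp ha).2
    have hb1 : b.1 = u := by simpa using (List.mem_filter.mp hb).2
    exact Prod.ext (ha1.trans hb1.symm) hab
  have hc : ((PySem.Set.ofList links).map (·.1)).count u
      = ((PySem.Set.ofList links).filter (fun p => p.1 == u)).length := by
    have hpred : ((fun x => x == u) ∘ fun x : Int × Int => x.1) = (fun p : Int × Int => p.1 == u) := rfl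
    simp [List.count_eq_countP, List.countP_eq_length_filter, List.filter_map, hpred]
  rw [ofList_map_inj _ _ hinj, List.length_map, ofList_filter, hc]

-- all is determined by membership and the pointwise value.
theorem all_ext_congr {α : Type} (l₁ l₂ : List α) (p q : α → Bool)
    (hm : ∀ x, x ∈ l₁ ↔ x ∈ l₂) (hpq : ∀ x, p x = q x) : l₁.all p = l₂.all q := by
  have hq : p = q := funext hpq
  subst hq
  apply Bool.eq_iff_iff.mpr
  simp only [List.all_eq_true]
  exact ⟨fun h x hx => h x ((hm x).mpr hx), fun h x hx => h x ((hm x).mp hx)⟩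

-- characterization of port A
theorem A_char (links : List (Int × Int)) :
    is_all_to_all links
      = (PySem.Set.ofList (links.map (·.1))).all (fun u =>
          ((PySem.Set.ofList ((links.filter (fun p => p.1 == u)).map (·.2))).length : Int)
            == ((PySem.Set.ofList (links.map (·.1))).length : Int) - 1) := by
  have hbody : (links.foldl (fun d link =>
        let d1 := if d.contains link.1 then d else d.insert link.1 PySem.Set.empty
        d1.insert link.1 (PySem.Set.add (d1.getD link.1 PySem.Set.empty) link.2))
        PySem.Dict.empty)
      = links.foldl (fun d p => d.insert p.1 (PySem.Set.add (d.getD p.1 PySem.Set.empty) p.2)) PySem.Dict.empty :=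
    PySem.List.foldl_congr_mem _ _ _ _ (fun acc x _ => stepA acc x)
  have hkeys : (links.foldl (fun d p => d.insert p.1 (PySem.Set.add (d.getD p.1 PySem.Set.empty) p.2)) PySem.Dict.empty).keys
      = PySem.Set.ofList (links.map (·.1)) := by
    rw [PySem.Dict.keys_foldl_insert_key, PySem.Dict.keys_empty, update_nil']
  have hsize : (links.foldl (fun d p => d.insert p.1 (PySem.Set.add (d.getD p.1 PySem.Set.empty) p.2)) PySem.Dict.empty).size
      = (PySem.Set.ofList (links.map (·.1))).length := by
    rw [← hkeys]
    simp [PySem.Dict.keys, PySem.Dict.size]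
  have hget : ∀ u, (links.foldl (fun d p => d.insert p.1 (PySem.Set.add (d.getD p.1 PySem.Set.empty) p.2)) PySem.Dict.empty).getD u PySem.Set.empty
      = PySem.Set.ofList ((links.filter (fun p => p.1 == u)).map (·.2)) := by
    intro u
    rw [foldA_getD, PySem.Dict.getD_empty, update_nil]
  simp only [is_all_to_all, hbody, hkeys, hsize, hget]

-- splitting the first element's duplicates out of a first-occurrence dedup, up to permutation
theorem ofList_cons_perm (u : Int) (m : List Int) :
    (PySem.Set.ofList (u :: m)).Perm (u :: PySem.Set.ofList (m.filter (fun x => !(x == u)))) := by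
  apply (List.perm_ext_iff_of_nodup (PySem.Set.nodup_ofList _) ?_).mpr
  · intro x
    simp only [PySem.Set.mem_ofList, List.mem_cons, List.mem_filter, Bool.not_eq_eq_eq_not,
      Bool.not_true, beq_eq_false_iff_ne, ne_eq]
    by_cases hx : x = u <;> simp [hx]
  · refine List.Nodup.cons ?_ (PySem.Set.nodup_ofList _)
    intro hu
    have := (PySem.Set.mem_ofList _ _).mp hu
    simp at this

-- a source's multiplicity in an edge list is the length of its filtered run
theorem count_fst_eq_filter_len (l : List (Int × Int)) (v : Int) :
    ((l.map (·.1)).count v) = (l.filter (fun p => p.1 == v)).length := by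
  rw [List.count_eq_countP, List.countP_map, ← List.countP_eq_length_filter]
  rfl

-- the worklist run-extraction loop produces exactly the per-source multiplicities of the
-- deduped edge list, up to permutation
theorem pvSizes_perm : ∀ (es : List (Int × Int)),
    (pvSizes es).Perm ((PySem.Set.ofList (es.map (·.1))).map
      (fun u => (((es.map (·.1)).count u : Nat) : Int))) := by
  intro es
  induction es using pvSizes.induct with
  | case1 => simp [pvSizes]
  | case2 e t u ih =>
    rw [pvSizes]
    show ((((e :: t).filter (fun p => p.1 == e.1)).length : Int)
        :: pvSizes ((e :: t).filter (fun p => !(p.1 == e.1)))).Perm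
      ((PySem.Set.ofList ((e :: t).map (·.1))).map
        (fun v => ((((e :: t).map (·.1)).count v : Nat) : Int)))
    have ih' : (pvSizes ((e :: t).filter (fun p => !(p.1 == e.1)))).Perm
        ((PySem.Set.ofList (((e :: t).filter (fun p => !(p.1 == e.1))).map (·.1))).map
          (fun v => ((((((e :: t).filter (fun p => !(p.1 == e.1))).map (·.1)).count v : Nat)) : Int))) := ih
    have hrest : (e :: t).filter (fun p => !(p.1 == e.1)) = t.filter (fun p => !(p.1 == e.1)) := by
      simp
    -- counts are unchanged by removing the first source's run
    have hcnt : ∀ v, v ≠ e.1 →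
        ((((e :: t).filter (fun p => !(p.1 == e.1))).map (·.1)).count v)
          = (((e :: t).map (·.1)).count v) := by
      intro v hv
      rw [hrest, count_fst_eq_filter_len, count_fst_eq_filter_len, List.filter_filter]
      have h2 : (e :: t).filter (fun p => p.1 == v) = t.filter (fun p => p.1 == v) := by
        simp [Ne.symm hv]
      rw [h2]
      congr 1
      apply List.filter_congr
      intro a _
      by_cases ha : a.1 = v
      · simp [ha, hv]
      · simp [ha]
    -- sources of the rest = sources of t with e.1 filtered out
    have hfm : ((e :: t).filter (fun p => !(p.1 == e.1))).map (·.1)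
        = (t.map (·.1)).filter (fun x => !(x == e.1)) := by
      rw [hrest, List.filter_map]
      rfl
    -- IH, with each count rewritten to a count over the full list
    have step1 : (pvSizes ((e :: t).filter (fun p => !(p.1 == e.1)))).Perm
        ((PySem.Set.ofList ((t.map (·.1)).filter (fun x => !(x == e.1)))).map
          (fun v => ((((e :: t).map (·.1)).count v : Nat) : Int))) := by
      refine ih'.trans (List.Perm.of_eq ?_)
      rw [hfm]
      refine List.map_congr_left (fun v hv => ?_)
      have hvne : v ≠ e.1 := by
        have h1 := (PySem.Set.mem_ofList _ _).mp hv
        have h2 := (List.mem_filter.mp h1).2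
        simpa using h2
      rw [← hfm, hcnt v hvne]
    have step2 : ((((e :: t).filter (fun p => p.1 == e.1)).length : Int)
          :: pvSizes ((e :: t).filter (fun p => !(p.1 == e.1)))).Perm
        ((e.1 :: PySem.Set.ofList ((t.map (·.1)).filter (fun x => !(x == e.1)))).map
          (fun v => ((((e :: t).map (·.1)).count v : Nat) : Int))) := by
      have hh : List.count e.1 (e.1 :: List.map (fun x => x.1) t)
          = (List.filter (fun p => p.1 == e.1) (e :: t)).length :=
        count_fst_eq_filter_len (e :: t) e.1
      simp only [List.map_cons]
      rw [hh]
      exact step1.cons _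
    refine step2.trans ?_
    refine (List.Perm.map _ ?_).symm
    have hm : (e :: t).map (·.1) = e.1 :: t.map (·.1) := by simp
    rw [hm]
    exact ofList_cons_perm e.1 (t.map (·.1))

-- characterization of port B (same shape as A_char, over the deduped edge list)
theorem B_char (links : List (Int × Int)) :
    is_all_to_all_alt links
      = (PySem.Set.ofList (((PySem.Set.ofList links).map (·.1)))).all (fun u =>
          ((((PySem.Set.ofList links).map (·.1)).count u : Int)
            == ((PySem.Set.ofList (((PySem.Set.ofList links).map (·.1)))).length : Int) - 1)) := by
  have hperm := pvSizes_perm (PySem.Set.ofList links)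
  have hded : PySem.List.dedup links = PySem.Set.ofList links := by
    simp [PySem.List.dedup_eq_ofList]
  have hlen : ((pvSizes (PySem.Set.ofList links)).length : Int)
      = ((PySem.Set.ofList (((PySem.Set.ofList links).map (·.1)))).length : Int) := by
    rw [hperm.length_eq, List.length_map]
  simp only [is_all_to_all_alt, hded]
  rw [hlen]
  rw [all_ext_congr _ _ _ _ (fun x => hperm.mem_iff) (fun x => rfl), List.all_map]
  rfl

theorem keys_mem_iff (links : List (Int × Int)) (x : Int) :
    x ∈ PySem.Set.ofList (links.map (·.1)) ↔ x ∈ PySem.Set.ofList ((PySem.Set.ofList links).map (·.1)) := by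
  simp [PySem.Set.mem_ofList, List.mem_map]

theorem keys_len_eq (links : List (Int × Int)) :
    (PySem.Set.ofList (links.map (·.1))).length
      = (PySem.Set.ofList ((PySem.Set.ofList links).map (·.1))).length := by
  exact ((List.perm_ext_iff_of_nodup (PySem.Set.nodup_ofList _) (PySem.Set.nodup_ofList _)).mpr
    (keys_mem_iff links)).length_eq

-- ===== VERDICT (by name: the statement is the Claim_ definition above) =====
theorem is_all_to_all_spec : Claim_equal_is_all_to_all := by
  intro links _
  unfold Spec_is_all_to_all
  rw [A_char, B_char]
  exact all_ext_congr _ _ _ _ (keys_mem_iff links)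
    (fun u => by rw [count_core, keys_len_eq])
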